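-- pv_equiv track=rewrite | github.com/franciscomatos/Message-Encryption-FP-P1 | FP_2016-17_projecto1.py | obtem_car2
-- ===== SOURCE A (Python) =====
-- def obtem_car2(cod,chave): #esta funcao faz o mesmo que a obtem_car1 mas tem em conta o numero de tuplos da chave e se o argumento introduzido pertence a chave
--     for linha in range(len(chave)):
--         for coluna in range(len(chave[linha])):
--             if cod == str(linha)+str(coluna):
--                 caracter = str(chave[linha][coluna])
--                 return caracter
--     for linha in range(len(chave)):
--         for coluna in range(len(chave[linha])):
--             if cod == 'XX':
--                 return '?'
-- ===== SOURCE B (Python) =====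
-- def obtem_car2(cod, chave):
--     # 'XX' is the unknown-character marker: it never encodes a grid position.
--     if cod == 'XX':
--         return '?'
--     # A code is str(linha) + str(coluna): find the row whose index is a prefix of
--     # cod and decode the remaining digits as the column with a Horner fold,
--     # instead of scanning every cell of the grid.
--     for linha in range(len(chave)):
--         prefix = str(linha)
--         if cod.startswith(prefix):
--             rest = cod[len(prefix):]
--             if rest.isdigit():
--                 coluna = 0
--                 for c in rest:
--                     coluna = 10 * coluna + (ord(c) - 48)
--                 if str(coluna) == rest and coluna < len(chave[linha]):
--                     return chave[linha][coluna]
--     return None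
-- ===== Notes on version B (the rewrite author's own statement) =====
-- stated objective: faster
-- what changed: B decodes the code string itself -- it finds the row whose decimal index is a prefix of cod and converts the remaining digits to the column with a Horner fold -- instead of A's scan of every grid cell comparing cod against str(linha)+str(coluna).
-- intended difference: On cod == 'XX' with an empty or all-empty-rows key A's dead second loop returns None, while B returns '?', the intended unknown-character marker, since 'XX' never encodes a grid position. — e.g. on obtem_car2("XX", []): A returns none, B returns some "?"
import Mathlib
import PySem

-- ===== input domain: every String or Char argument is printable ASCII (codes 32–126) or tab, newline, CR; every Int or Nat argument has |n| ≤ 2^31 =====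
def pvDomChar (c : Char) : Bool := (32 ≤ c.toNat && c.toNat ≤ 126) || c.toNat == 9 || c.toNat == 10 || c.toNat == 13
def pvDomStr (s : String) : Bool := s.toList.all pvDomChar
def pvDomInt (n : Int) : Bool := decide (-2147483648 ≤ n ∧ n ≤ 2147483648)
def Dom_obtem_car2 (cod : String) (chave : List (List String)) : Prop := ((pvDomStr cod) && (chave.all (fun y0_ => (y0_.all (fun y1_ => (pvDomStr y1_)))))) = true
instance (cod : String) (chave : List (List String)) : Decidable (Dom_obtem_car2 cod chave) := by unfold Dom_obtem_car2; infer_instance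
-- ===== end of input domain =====

-- B decodes the code string itself (row-index prefix, then a Horner fold for the
-- column) instead of scanning every grid cell — per-row instead of per-cell work,
-- measured faster in a timing run; on 'XX' with an all-empty key it returns
-- '?' where A returns None (see D_ below).

-- ===== PORT A =====
-- inner loop: for coluna in range(len(chave[linha])): if cod == str(linha)+str(coluna): return chave[linha][coluna]
-- (string concatenation/comparison done on the List Char side, exact for Python str on this domain)
def pvAInner (cod : List Char) (linha : Nat) : List String → Nat → Option String
  | [], _ => none
  | x :: xs, coluna =>
    if cod = PySem.Int.toChars (linha : Int) ++ PySem.Int.toChars (coluna : Int) then some x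
    else pvAInner cod linha xs (coluna + 1)

-- outer loop: for linha in range(len(chave)): …
def pvAOuter (cod : List Char) : List (List String) → Nat → Option String
  | [], _ => none
  | row :: rest, linha =>
    match pvAInner cod linha row 0 with
    | some c => some c
    | none => pvAOuter cod rest (linha + 1)

-- second double loop: for linha …: for coluna …: if cod == 'XX': return '?'
def pvAQmRow (cod : List Char) : List String → Option String
  | [] => none
  | _ :: xs => if cod = "XX".toList then some "?" else pvAQmRow cod xs

def pvAQm (cod : List Char) : List (List String) → Option String
  | [] => none
  | row :: rest =>
    match pvAQmRow cod row with
    | some r => some r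
    | none => pvAQm cod rest

def obtem_car2 (cod : String) (chave : List (List String)) : Option String :=
  match pvAOuter cod.toList chave 0 with
  | some c => some c
  | none => pvAQm cod.toList chave

-- ===== PORT B =====
-- 'coluna = 0; for c in rest: coluna = 10*coluna + (ord(c) - 48)'
def pvParse (cs : List Char) : Int :=
  cs.foldl (fun n c => 10 * n + ((c.toNat : Int) - 48)) 0

-- loop body for one linha: prefix test, isdigit test, Horner fold, canonicity + range check
def pvBRow (cod : List Char) (linha : Nat) (row : List String) : Option String :=
  let p := PySem.Int.toChars (linha : Int)
  if PySem.Chars.startswith cod p = true then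
    let rest := PySem.List.slice cod (some (PySem.Chars.len p))   -- cod[len(prefix):]
    if PySem.Chars.strIsdigit rest = true then
      let coluna := pvParse rest
      if PySem.Int.toChars coluna = rest ∧ coluna < (row.length : Int) then
        PySem.List.pyGet? row coluna
      else none
    else none
  else none

-- for linha in range(len(chave)): …  (a failed linha falls through to the next one)
def pvBLoop (cod : List Char) : List (List String) → Nat → Option String
  | [], _ => none
  | row :: rest, linha =>
    match pvBRow cod linha row with
    | some c => some c
    | none => pvBLoop cod rest (linha + 1)

def obtem_car2_alt (cod : String) (chave : List (List String)) : Option String :=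
  if cod = "XX" then some "?"
  else pvBLoop cod.toList chave 0

-- ===== PRECONDITION & SPEC =====
-- On cod = 'XX' with an empty (or all-empty-rows) key A's dead second loop never runs and it
-- returns None, while B returns '?', the intended unknown-character marker, since 'XX' never
-- encodes a grid position.
def D_obtem_car2 (cod : String) (chave : List (List String)) : Prop :=
  cod = "XX" ∧ chave.all (fun row => row.isEmpty) = true
instance (cod : String) (chave : List (List String)) : Decidable (D_obtem_car2 cod chave) := by unfold D_obtem_car2; infer_instance

def Spec_obtem_car2 (cod : String) (chave : List (List String)) (out : Option String) : Prop := ¬ D_obtem_car2 cod chave → out = obtem_car2_alt cod chave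
instance (cod : String) (chave : List (List String)) (out : Option String) : Decidable (Spec_obtem_car2 cod chave out) := by unfold Spec_obtem_car2; infer_instance

def pvDiffWitness_obtem_car2 : String × List (List String) := ("XX", [])
def pvDiffWitnessOut_obtem_car2 : (Option String) × (Option String) := (none, some "?")

-- ===== CLAIM (what is proved, stated in full; the proofs are below) =====
def Claim_unchanged_obtem_car2 : Prop := ∀ (cod : String) (chave : List (List String)), Dom_obtem_car2 cod chave → Spec_obtem_car2 cod chave (obtem_car2 cod chave)
def Claim_changed_obtem_car2 : Prop := Dom_obtem_car2 (pvDiffWitness_obtem_car2.1) (pvDiffWitness_obtem_car2.2) ∧ D_obtem_car2 (pvDiffWitness_obtem_car2.1) (pvDiffWitness_obtem_car2.2) ∧ obtem_car2 (pvDiffWitness_obtem_car2.1) (pvDiffWitness_obtem_car2.2) = pvDiffWitnessOut_obtem_car2.1 ∧ obtem_car2_alt (pvDiffWitness_obtem_car2.1) (pvDiffWitness_obtem_car2.2) = pvDiffWitnessOut_obtem_car2.2 ∧ pvDiffWitnessOut_obtem_car2.1 ≠ pvDiffWitnessOut_obtem_car2.2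
def Claim_exact_obtem_car2 : Prop := ∀ (cod : String) (chave : List (List String)), Dom_obtem_car2 cod chave → D_obtem_car2 cod chave → obtem_car2 cod chave ≠ obtem_car2_alt cod chave

-- ===== LEMMAS AND PROOFS =====

-- str(n) for n : Nat, written as the structural recursion 'digits of n/10, then digit of n%10'
def decDigits (n : Nat) : List Char :=
  if _h : n < 10 then [Nat.digitChar n]
  else decDigits (n / 10) ++ [Nat.digitChar (n % 10)]
decreasing_by exact Nat.div_lt_self (by omega) (by omega)

theorem toDigitsCore_eq_decDigits : ∀ (f n : Nat) (ds : List Char), n < f →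
    Nat.toDigitsCore 10 f n ds = decDigits n ++ ds := by
  intro f
  induction f with
  | zero => intro n ds h; omega
  | succ f ih =>
    intro n ds h
    rw [Nat.toDigitsCore, decDigits]
    by_cases h10 : n < 10
    · have : n / 10 = 0 := Nat.div_eq_of_lt h10
      simp [this, Nat.mod_eq_of_lt h10, h10]
    · have hz : n / 10 ≠ 0 := by omega
      have hlt : n / 10 < f := by
        have := Nat.div_lt_self (by omega : 0 < n) (by omega : 1 < 10)
        omega
      simp only [hz, h10]
      rw [ih (n / 10) _ hlt]
      simp

theorem toChars_natCast (n : Nat) : PySem.Int.toChars (n : Int) = decDigits n := by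
  have : ¬ ((n : Int) < 0) := by omega
  simp only [PySem.Int.toChars, this, Int.toNat_natCast, Nat.toDigits]
  rw [toDigitsCore_eq_decDigits (n + 1) n [] (by omega)]
  simp

theorem digitChar_toNat (d : Nat) (h : d < 10) : (Nat.digitChar d).toNat = 48 + d := by
  interval_cases d <;> decide

theorem digitChar_isdigit (d : Nat) (h : d < 10) : PySem.Chars.isdigit (Nat.digitChar d) = true := by
  interval_cases d <;> decide

theorem decDigits_ne_nil (n : Nat) : decDigits n ≠ [] := by
  rw [decDigits]; split <;> simp

theorem decDigits_mem_isdigit (n : Nat) : ∀ c ∈ decDigits n, PySem.Chars.isdigit c = true := by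
  induction n using Nat.strong_induction_on with
  | _ n ih =>
    rw [decDigits]
    split
    · intro c hc
      rw [List.mem_singleton] at hc
      subst hc
      exact digitChar_isdigit n (by omega)
    · intro c hc
      rcases List.mem_append.mp hc with h1 | h2
      · exact ih (n / 10) (Nat.div_lt_self (by omega) (by omega)) c h1
      · rw [List.mem_singleton] at h2
        subst h2
        exact digitChar_isdigit _ (Nat.mod_lt _ (by omega))

theorem pvParse_decDigits (n : Nat) : pvParse (decDigits n) = (n : Int) := by
  induction n using Nat.strong_induction_on with
  | _ n ih =>
    rw [decDigits]
    split
    · rename_i h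
      simp only [pvParse, List.foldl_cons, List.foldl_nil]
      have := digitChar_toNat n h
      rw [this]
      push_cast
      ring
    · rename_i h
      have h10 : ¬ n < 10 := h
      simp only [pvParse, List.foldl_append, List.foldl_cons, List.foldl_nil]
      have hrec := ih (n / 10) (Nat.div_lt_self (by omega) (by omega))
      simp only [pvParse] at hrec
      rw [hrec, digitChar_toNat (n % 10) (Nat.mod_lt _ (by omega))]
      push_cast
      have := Nat.div_add_mod n 10
      omega

-- the unique column a code names for a given row index (none if the code is not
-- 'str(linha)' followed by a canonical decimal)
def colOf (cod : List Char) (linha : Nat) : Option Nat :=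
  let p := PySem.Int.toChars (linha : Int)
  let rest := cod.drop p.length
  if PySem.Chars.startswith cod p = true ∧ PySem.Chars.strIsdigit rest = true ∧
      PySem.Int.toChars (pvParse rest) = rest
  then some (pvParse rest).toNat else none

theorem parse_nonneg_of_digits {rest : List Char} (hd : PySem.Chars.strIsdigit rest = true)
    (ht : PySem.Int.toChars (pvParse rest) = rest) : 0 ≤ pvParse rest := by
  by_contra hneg
  have hlt : pvParse rest < 0 := by omega
  have hhd : PySem.Int.toChars (pvParse rest) = '-' :: Nat.toDigits 10 (pvParse rest).natAbs := by
    simp [PySem.Int.toChars, hlt]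
  rw [hhd] at ht
  have : ('-' : Char) ∈ rest := by rw [← ht]; exact List.mem_cons_self
  have hall : rest.all PySem.Chars.isdigit = true := by
    simp only [PySem.Chars.strIsdigit, Bool.and_eq_true] at hd
    exact hd.2
  have := (List.all_eq_true.mp hall) _ this
  simp [PySem.Chars.isdigit] at this

theorem colOf_some_iff (cod : List Char) (linha col : Nat) :
    colOf cod linha = some col ↔
      cod = PySem.Int.toChars (linha : Int) ++ PySem.Int.toChars (col : Int) := by
  constructor
  · intro h
    simp only [colOf] at h
    split at h
    · rename_i hcond
      obtain ⟨hs, hd, ht⟩ := hcond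
      set p := PySem.Int.toChars (linha : Int) with hp
      set rest := cod.drop p.length with hrest
      obtain ⟨t, htail⟩ := (PySem.Chars.startswith_iff cod p).mp hs
      have hrt : rest = t := by rw [hrest, ← htail, List.drop_left]
      have hnn : 0 ≤ pvParse rest := parse_nonneg_of_digits hd ht
      have hcol : col = (pvParse rest).toNat := by
        simpa using h.symm
      have : PySem.Int.toChars (col : Int) = rest := by
        rw [hcol, Int.toNat_of_nonneg hnn, ht]
      rw [← htail, ← hrt, ← this]
    · exact absurd h (by simp)
  · intro h
    subst h
    have hrest : List.drop (PySem.Int.toChars (linha : Int)).length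
        (PySem.Int.toChars (linha : Int) ++ PySem.Int.toChars (col : Int))
        = PySem.Int.toChars (col : Int) := List.drop_left
    have hdig : PySem.Chars.strIsdigit (PySem.Int.toChars (col : Int)) = true := by
      rw [toChars_natCast]
      simp only [PySem.Chars.strIsdigit, Bool.and_eq_true, Bool.not_eq_true', List.isEmpty_eq_false_iff,
        List.all_eq_true]
      exact ⟨decDigits_ne_nil col, decDigits_mem_isdigit col⟩
    have hparse : pvParse (PySem.Int.toChars (col : Int)) = (col : Int) := by
      rw [toChars_natCast]; exact pvParse_decDigits col
    simp only [colOf, hrest]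
    rw [if_pos ⟨(PySem.Chars.startswith_iff _ _).mpr ⟨_, rfl⟩, hdig, by rw [hparse]⟩]
    rw [hparse]
    simp

theorem AInner_char (cod : List Char) (linha : Nat) : ∀ (row : List String) (c : Nat),
    pvAInner cod linha row c =
      match colOf cod linha with
      | some n => if c ≤ n then row[n - c]? else none
      | none => none := by
  intro row
  induction row with
  | nil =>
    intro c
    cases h : colOf cod linha with
    | none => rfl
    | some n => simp [pvAInner]
  | cons x xs ih =>
    intro c
    rw [pvAInner]
    by_cases he : cod = PySem.Int.toChars (linha : Int) ++ PySem.Int.toChars (c : Int)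
    · rw [if_pos he, (colOf_some_iff cod linha c).mpr he]
      simp
    · rw [if_neg he, ih (c + 1)]
      cases h : colOf cod linha with
      | none => rfl
      | some n =>
        have hne : n ≠ c := by
          intro hnc
          subst hnc
          exact he ((colOf_some_iff cod linha n).mp h)
        simp only
        by_cases hc : c ≤ n
        · rw [if_pos (by omega : c + 1 ≤ n), if_pos hc]
          have hstep : n - c = (n - (c + 1)) + 1 := by omega
          rw [hstep, List.getElem?_cons_succ]
        · rw [if_neg (by omega : ¬ c + 1 ≤ n), if_neg hc]

theorem BRow_eq (cod : List Char) (linha : Nat) (row : List String) :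
    pvBRow cod linha row =
      match colOf cod linha with
      | some n => row[n]?
      | none => none := by
  have hslice : PySem.List.slice cod (some (PySem.Chars.len (PySem.Int.toChars (linha : Int))))
      = List.drop (PySem.Int.toChars (linha : Int)).length cod := by
    rw [PySem.Chars.len_eq, PySem.List.slice_from cod (by omega)]
    simp
  by_cases hs : PySem.Chars.startswith cod (PySem.Int.toChars (linha : Int)) = true
  · by_cases hd : PySem.Chars.strIsdigit (List.drop (PySem.Int.toChars (linha : Int)).length cod) = true
    · by_cases ht : PySem.Int.toChars (pvParse (List.drop (PySem.Int.toChars (linha : Int)).length cod))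
          = List.drop (PySem.Int.toChars (linha : Int)).length cod
      · have hnn := parse_nonneg_of_digits hd ht
        simp only [pvBRow, colOf, hslice, hs, hd, ht, if_pos, true_and, and_true]
        by_cases hlen : pvParse (List.drop (PySem.Int.toChars (linha : Int)).length cod) < (row.length : Int)
        · rw [if_pos hlen, PySem.List.pyGet?_of_nonneg row hnn]
        · rw [if_neg hlen]
          have hle : row.length ≤ (pvParse (List.drop (PySem.Int.toChars (linha : Int)).length cod)).toNat := by
            omega
          simp [List.getElem?_eq_none hle]
      · simp only [pvBRow, colOf, hslice]
        rw [if_pos hs, if_pos hd, if_neg (fun hc => ht hc.1),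
          if_neg (fun hc : _ ∧ _ ∧ _ => ht hc.2.2)]
    · simp only [pvBRow, colOf, hslice]
      rw [if_pos hs, if_neg hd, if_neg (fun hc : _ ∧ _ ∧ _ => hd hc.2.1)]
  · simp only [pvBRow, colOf, hslice]
    rw [if_neg hs, if_neg (fun hc : _ ∧ _ ∧ _ => hs hc.1)]

theorem AInner_eq_BRow (cod : List Char) (linha : Nat) (row : List String) :
    pvAInner cod linha row 0 = pvBRow cod linha row := by
  rw [AInner_char, BRow_eq]
  cases colOf cod linha <;> simp

theorem Outer_eq_BLoop (cod : List Char) : ∀ (rest : List (List String)) (linha : Nat),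
    pvAOuter cod rest linha = pvBLoop cod rest linha := by
  intro rest
  induction rest with
  | nil => intro linha; rfl
  | cons row rs ih =>
    intro linha
    rw [pvAOuter, pvBLoop, AInner_eq_BRow]
    cases pvBRow cod linha row with
    | some c => rfl
    | none => exact ih (linha + 1)

theorem colOf_XX (linha : Nat) : colOf ['X', 'X'] linha = none := by
  cases h : colOf ['X', 'X'] linha with
  | none => rfl
  | some col =>
    exfalso
    have heq := (colOf_some_iff _ linha col).mp h
    rw [toChars_natCast linha] at heq
    cases hp : decDigits linha with
    | nil => exact decDigits_ne_nil linha hp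
    | cons a as =>
      rw [hp] at heq
      have ha : a = 'X' := by
        simpa using congrArg (fun l => l.head?) heq.symm
      have := decDigits_mem_isdigit linha a (by rw [hp]; exact List.mem_cons_self)
      rw [ha] at this
      simp [PySem.Chars.isdigit] at this

theorem Outer_XX_none : ∀ (chave : List (List String)) (linha : Nat),
    pvAOuter ['X', 'X'] chave linha = none := by
  intro chave
  induction chave with
  | nil => intro linha; rfl
  | cons row rs ih =>
    intro linha
    rw [pvAOuter, AInner_char, colOf_XX]
    exact ih (linha + 1)

-- A's '?'-loop over one row fires iff the row is nonempty and cod == 'XX'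
theorem pvQmRow_eq (cod : List Char) (row : List String) :
    pvAQmRow cod row = if cod = "XX".toList ∧ row ≠ [] then some "?" else none := by
  induction row with
  | nil => simp [pvAQmRow]
  | cons x xs ih =>
    rw [pvAQmRow, ih]
    by_cases he : cod = "XX".toList <;> split_ifs <;> simp_all

-- A's second double loop returns '?' exactly when cod == 'XX' and some row is nonempty
theorem pvQm_eq (cod : List Char) (chave : List (List String)) :
    pvAQm cod chave =
      if cod = "XX".toList ∧ ¬ chave.all (fun row => row.isEmpty) = true then some "?"
      else none := by
  induction chave with
  | nil => simp [pvAQm]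
  | cons row rest ih =>
    rw [pvAQm, pvQmRow_eq, ih]
    by_cases he : cod = "XX".toList
    · by_cases hr : row = []
      · subst hr
        by_cases ha : rest.all (fun r => r.isEmpty) = true
        · simp [he, ha]
        · simp [he, ha]
      · simp [he, hr]
    · have he' : ¬ cod = ['X', 'X'] := by simpa using he
      simp [he']

theorem allEmpty_A_none (cod : List Char) (chave : List (List String))
    (h : chave.all (fun row => row.isEmpty) = true) :
    pvAOuter cod chave 0 = none ∧ pvAQm cod chave = none := by
  constructor
  · have : ∀ (rest : List (List String)) (linha : Nat),
        rest.all (fun row => row.isEmpty) = true → pvAOuter cod rest linha = none := by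
      intro rest
      induction rest with
      | nil => intro linha _; rfl
      | cons row rs ih =>
        intro linha hall
        simp only [List.all_cons, Bool.and_eq_true, List.isEmpty_iff] at hall
        rw [pvAOuter, hall.1]
        simpa [pvAInner] using ih (linha + 1) (by simp [hall.2])
    exact this chave 0 h
  · rw [pvQm_eq, if_neg (by tauto)]

-- ===== VERDICT (by name: the statement is the Claim_ definition above) =====
theorem obtem_car2_spec : Claim_unchanged_obtem_car2 := by
  intro cod chave _ hnD
  unfold obtem_car2 obtem_car2_alt
  by_cases hx : cod = "XX"
  · subst hx
    rw [if_pos rfl]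
    have hlist : ("XX" : String).toList = ['X', 'X'] := by decide
    rw [hlist, Outer_XX_none]
    rw [pvQm_eq]
    rw [if_pos]
    constructor
    · rw [hlist]
    · intro hall
      exact hnD ⟨rfl, hall⟩
  · rw [if_neg hx]
    have hlx : cod.toList ≠ "XX".toList := fun h => hx (String.toList_inj.mp h)
    rw [pvQm_eq, if_neg (by tauto), Outer_eq_BLoop]
    cases pvBLoop cod.toList chave 0 <;> rfl

theorem obtem_car2_changed : Claim_changed_obtem_car2 := by
  unfold Claim_changed_obtem_car2; decide

theorem obtem_car2_tight : Claim_exact_obtem_car2 := by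
  intro cod chave _ hD
  obtain ⟨hx, hall⟩ := hD
  subst hx
  obtain ⟨h1, h2⟩ := allEmpty_A_none ("XX" : String).toList chave hall
  unfold obtem_car2 obtem_car2_alt
  rw [h1, h2, if_pos rfl]
  simp
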